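-- pv_equiv track=rewrite | github.com/jmerle/advent-of-code-2024 | src/aoc2024/days/day21/part2.py | is_possible_path
-- ===== SOURCE A (Python) =====
-- def is_possible_path(g, source: str, path: str) -> bool:
--     grid = g[2]
--     w = len(grid[0])
--     h = len(grid)
--
--     for y in range(h):
--         for x in range(w):
--             if grid[y][x] == source:
--                 cx, cy = x, y
--                 break
--
--     for ch in path:
--         if ch == ">":
--             dx, dy = 1, 0
--         elif ch == "<":
--             dx, dy = -1, 0
--         elif ch == "v":
--             dx, dy = 0, 1
--         else:
--             dx, dy = 0, -1
--
--         cx, cy = cx + dx, cy + dy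
--
--         if cx < 0 or cx >= w or cy < 0 or cy >= h or grid[cy][cx] == " ":
--             return False
--
--     return True
-- ===== SOURCE B (Python) =====
-- def is_possible_path(g, source: str, path: str) -> bool:
--     grid = g[2]
--     w = len(grid[0])
--     h = len(grid)
--
--     # same start-finding loop as the original (keeps its exact behaviour)
--     for y in range(h):
--         for x in range(w):
--             if grid[y][x] == source:
--                 cx, cy = x, y
--                 break
--
--     # prefix-sum trajectory of relative offsets, then one validation pass
--     deltas = {">": (1, 0), "<": (-1, 0), "v": (0, 1)}
--     traj = []
--     tx = ty = 0
--     for ch in path: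
--         dx, dy = deltas.get(ch, (0, -1))
--         tx += dx
--         ty += dy
--         traj.append((tx, ty))
--
--     return all(0 <= cx + dx < w and 0 <= cy + dy < h and grid[cy + dy][cx + dx] != " "
--                for dx, dy in traj)
-- ===== Notes on version B (the rewrite author's own statement) =====
-- stated objective: alternative
-- what changed: The early-returning position-tracking walk is replaced by building the prefix-sum trajectory of relative offsets first and then validating every visited cell in a single all(...) pass (the start-finding nested loop is kept to preserve its behaviour).
-- outside the precondition, e.g. on is_possible_path(('', '', ['ab', 'a']), 'a', ''): A returns True, B returns True
import Mathlib
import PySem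

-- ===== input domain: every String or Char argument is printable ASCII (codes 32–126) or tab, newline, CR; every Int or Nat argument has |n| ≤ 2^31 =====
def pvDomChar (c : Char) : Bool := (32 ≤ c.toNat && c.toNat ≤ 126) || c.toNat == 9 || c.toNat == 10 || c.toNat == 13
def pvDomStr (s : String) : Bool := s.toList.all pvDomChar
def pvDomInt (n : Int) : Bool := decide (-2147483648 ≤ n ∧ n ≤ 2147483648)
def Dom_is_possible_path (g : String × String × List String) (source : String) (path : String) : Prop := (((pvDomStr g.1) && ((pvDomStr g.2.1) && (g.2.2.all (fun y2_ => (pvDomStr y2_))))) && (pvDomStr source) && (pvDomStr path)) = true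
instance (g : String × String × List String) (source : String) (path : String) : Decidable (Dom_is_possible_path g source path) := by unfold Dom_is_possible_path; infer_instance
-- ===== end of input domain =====

-- ===== PORT A =====
-- B changes only the path walk (trajectory + one validation pass); the start search is unchanged. No side effects.
-- direction vector for a path character ('^' is the Python else branch)
def pvDelta (ch : Char) : Int × Int :=
  if ch = '>' then (1, 0) else if ch = '<' then (-1, 0) else if ch = 'v' then (0, 1) else (0, -1)

-- grid[y][x]; exact for 0 ≤ y < h, 0 ≤ x < w on grids whose rows have length ≥ w (Pre_)
def pvCell (grid : List String) (y x : Int) : Char :=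
  (grid.getD y.toNat "").toList.getD x.toNat ' '

-- the nested find loop of both Pythons: inner break = first x in a row, outer loop keeps running,
-- so the result is (first x in the LAST row containing source); none = cx,cy left undefined
def pvFindStart (grid : List String) (w h : Nat) (source : String) : Option (Int × Int) :=
  (List.range h).foldl (fun acc y =>
    match (List.range w).find? (fun x => source == String.mk [(grid.getD y "").toList.getD x ' ']) with
    | some x => some ((x : Int), (y : Int))
    | none => acc) none

-- one iteration of A's walking loop (none = the early `return False` already happened)
def pvStep (grid : List String) (w h : Int) (st : Option (Int × Int)) (ch : Char) : Option (Int × Int) :=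
  match st with
  | none => none
  | some p =>
    let d := pvDelta ch
    let cx := p.1 + d.1
    let cy := p.2 + d.2
    if cx < 0 ∨ w ≤ cx ∨ cy < 0 ∨ h ≤ cy ∨ pvCell grid cy cx = ' ' then none
    else some (cx, cy)

def is_possible_path (g : String × String × List String) (source : String) (path : String) : Bool :=
  let grid := g.2.2
  let w : Int := (grid.headI).toList.length
  let h : Int := grid.length
  match pvFindStart grid (grid.headI).toList.length grid.length source with
  | none => true  -- Python: cx,cy undefined; under Pre_ this branch is reached only with empty path, where A returns True
  | some start => (path.toList.foldl (pvStep grid w h) (some start)).isSome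

-- ===== PORT B =====
-- one iteration of B's trajectory-building loop (appends the running prefix sum)
def pvBStep (acc : List (Int × Int) × (Int × Int)) (ch : Char) : List (Int × Int) × (Int × Int) :=
  let d := pvDelta ch
  let t := (acc.2.1 + d.1, acc.2.2 + d.2)
  (acc.1 ++ [t], t)

def is_possible_path_alt (g : String × String × List String) (source : String) (path : String) : Bool :=
  let grid := g.2.2
  let w : Int := (grid.headI).toList.length
  let h : Int := grid.length
  -- prefix-sum trajectory of relative offsets (the tx/ty loop with traj.append)
  let traj := (path.toList.foldl pvBStep ([], (0, 0))).1
  match pvFindStart grid (grid.headI).toList.length grid.length source with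
  | none => traj.isEmpty  -- Python: empty generator never reads cx; nonempty traj would raise (excluded by Pre_)
  | some s =>
    traj.all (fun t => decide (0 ≤ s.1 + t.1 ∧ s.1 + t.1 < w ∧ 0 ≤ s.2 + t.2 ∧ s.2 + t.2 < h ∧
                              pvCell grid (s.2 + t.2) (s.1 + t.1) ≠ ' '))

-- ===== PRECONDITION & SPEC =====
-- Pre_ excludes inputs where A raises: an empty grid (IndexError on grid[0]), source not found with a
-- nonempty path (NameError on undefined cx), and grids with a row shorter than w, on which the scans
-- index past a row's end (this also excludes some ragged grids on which A happens to return because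
-- every short row contains source early; both programs behave identically there too).
def Pre_is_possible_path (g : String × String × List String) (source : String) (path : String) : Prop :=
  g.2.2 ≠ [] ∧
  (∀ row ∈ g.2.2, (g.2.2.headI).toList.length ≤ row.toList.length) ∧
  (path = "" ∨
    (g.2.2.any (fun row =>
      (row.toList.take (g.2.2.headI).toList.length).any (fun c => source == String.mk [c]))) = true)
instance (g : String × String × List String) (source : String) (path : String) : Decidable (Pre_is_possible_path g source path) := by unfold Pre_is_possible_path; infer_instance

def pvWitness_is_possible_path : (String × String × List String) × String × String :=
  (("", "", ["ab"]), "a", ">")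

def Spec_is_possible_path (g : String × String × List String) (source : String) (path : String) (out : Bool) : Prop := out = is_possible_path_alt g source path
instance (g : String × String × List String) (source : String) (path : String) (out : Bool) : Decidable (Spec_is_possible_path g source path out) := by unfold Spec_is_possible_path; infer_instance

-- ===== CLAIM (what is proved, stated in full; the proofs are below) =====
def Claim_equal_is_possible_path : Prop := ∀ (g : String × String × List String) (source : String) (path : String), Dom_is_possible_path g source path → Pre_is_possible_path g source path → Spec_is_possible_path g source path (is_possible_path g source path)

-- ===== LEMMAS AND PROOFS =====

-- the absolute positions visited when walking cs from p
def pvTrajRec (p : Int × Int) : List Char → List (Int × Int)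
  | [] => []
  | c :: cs =>
    let q := (p.1 + (pvDelta c).1, p.2 + (pvDelta c).2)
    q :: pvTrajRec q cs

-- B's list-building fold produces acc ++ the recursive trajectory
theorem pvBuild (cs : List Char) (acc : List (Int × Int)) (p : Int × Int) :
    (cs.foldl pvBStep (acc, p)).1 = acc ++ pvTrajRec p cs := by
  induction cs generalizing acc p with
  | nil => simp [pvTrajRec]
  | cons c cs ih => simp [pvTrajRec, pvBStep, ih, List.append_assoc]

-- translating the start translates the trajectory
theorem pvShift (cs : List Char) (p q : Int × Int) :
    pvTrajRec (p.1 + q.1, p.2 + q.2) cs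
      = (pvTrajRec q cs).map (fun t => (p.1 + t.1, p.2 + t.2)) := by
  induction cs generalizing q with
  | nil => simp [pvTrajRec]
  | cons c cs ih =>
    simp only [pvTrajRec, List.map_cons, add_assoc]
    exact List.cons_eq_cons.mpr ⟨rfl, ih (q.1 + (pvDelta c).1, q.2 + (pvDelta c).2)⟩

theorem pvFoldNone (grid : List String) (w h : Int) (cs : List Char) :
    cs.foldl (pvStep grid w h) none = none := by
  induction cs with
  | nil => rfl
  | cons c cs ih => simpa [pvStep] using ih

-- main invariant: A's early-exit walk succeeds iff every trajectory position is valid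
theorem pvWalk (grid : List String) (w h : Int) (cs : List Char) (p : Int × Int) :
    (cs.foldl (pvStep grid w h) (some p)).isSome
    = (pvTrajRec p cs).all (fun t =>
        decide (0 ≤ t.1 ∧ t.1 < w ∧ 0 ≤ t.2 ∧ t.2 < h ∧ pvCell grid t.2 t.1 ≠ ' ')) := by
  induction cs generalizing p with
  | nil => simp [pvTrajRec]
  | cons c cs ih =>
    have hstep : pvStep grid w h (some p) c =
        if p.1 + (pvDelta c).1 < 0 ∨ w ≤ p.1 + (pvDelta c).1 ∨ p.2 + (pvDelta c).2 < 0 ∨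
            h ≤ p.2 + (pvDelta c).2 ∨
            pvCell grid (p.2 + (pvDelta c).2) (p.1 + (pvDelta c).1) = ' ' then none
        else some (p.1 + (pvDelta c).1, p.2 + (pvDelta c).2) := rfl
    simp only [List.foldl_cons, pvTrajRec, List.all_cons, hstep]
    by_cases hg : p.1 + (pvDelta c).1 < 0 ∨ w ≤ p.1 + (pvDelta c).1 ∨ p.2 + (pvDelta c).2 < 0 ∨
        h ≤ p.2 + (pvDelta c).2 ∨ pvCell grid (p.2 + (pvDelta c).2) (p.1 + (pvDelta c).1) = ' '
    · have hv : ¬ (0 ≤ p.1 + (pvDelta c).1 ∧ p.1 + (pvDelta c).1 < w ∧ 0 ≤ p.2 + (pvDelta c).2 ∧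
          p.2 + (pvDelta c).2 < h ∧ pvCell grid (p.2 + (pvDelta c).2) (p.1 + (pvDelta c).1) ≠ ' ') := by
        rcases hg with h1 | h1 | h1 | h1 | h1 <;> intro hc <;>
          rcases hc with ⟨a1, a2, a3, a4, a5⟩ <;> first | omega | exact a5 h1
      rw [if_pos hg, pvFoldNone]
      simp [hv]
    · have hv : (0 ≤ p.1 + (pvDelta c).1 ∧ p.1 + (pvDelta c).1 < w ∧ 0 ≤ p.2 + (pvDelta c).2 ∧
          p.2 + (pvDelta c).2 < h ∧ pvCell grid (p.2 + (pvDelta c).2) (p.1 + (pvDelta c).1) ≠ ' ') := by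
        push_neg at hg
        exact ⟨hg.1, hg.2.1, hg.2.2.1, hg.2.2.2.1, hg.2.2.2.2⟩
      rw [if_neg hg, ih]
      simp [hv]

-- if some cell in the first w columns equals source, the find loop succeeds
theorem pvFindStart_found (grid : List String) (source : String)
    (hf : (grid.any (fun row =>
      (row.toList.take (grid.headI).toList.length).any (fun c => source == String.mk [c]))) = true) :
    pvFindStart grid (grid.headI).toList.length grid.length source ≠ none := by
  unfold pvFindStart
  rw [List.any_eq_true] at hf
  obtain ⟨row, hrow, hr⟩ := hf
  rw [List.any_eq_true] at hr
  obtain ⟨c, hc, hcs⟩ := hr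
  obtain ⟨y, hy, hget⟩ := List.mem_iff_getElem.mp hrow
  have hx : ∃ x ∈ List.range (grid.headI).toList.length,
      (source == String.mk [(grid.getD y "").toList.getD x ' ']) = true := by
    obtain ⟨x, hxlt, hcx⟩ := List.mem_iff_getElem.mp hc
    have hmin := hxlt
    rw [List.length_take] at hmin
    have hxw : x < (grid.headI).toList.length := lt_of_lt_of_le hmin (min_le_left _ _)
    have hx2 : x < row.toList.length := lt_of_lt_of_le hmin (min_le_right _ _)
    refine ⟨x, List.mem_range.mpr hxw, ?_⟩
    have hgd : grid.getD y "" = row := by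
      simp [List.getD, hget, List.getElem?_eq_getElem hy]
    have hcd : (grid.getD y "").toList.getD x ' ' = c := by
      rw [hgd, List.getD_eq_getElem _ _ hx2, ← hcx]
      simp [List.getElem_take]
    rw [hcd]; exact hcs
  intro hnone
  have key : ∀ (ys : List Nat) (init : Option (Int × Int)),
      (∃ y0 ∈ ys, ((List.range (grid.headI).toList.length).find? (fun x =>
          source == String.mk [(grid.getD y0 "").toList.getD x ' '])).isSome) ∨ init.isSome →
      (ys.foldl (fun acc y =>
        match (List.range (grid.headI).toList.length).find? (fun x =>
          source == String.mk [(grid.getD y "").toList.getD x ' ']) with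
        | some x => some ((x : Int), (y : Int))
        | none => acc) init).isSome := by
    intro ys
    induction ys with
    | nil =>
      intro init h
      rcases h with ⟨_, h, _⟩ | h
      · simp at h
      · simpa using h
    | cons z zs ihz =>
      intro init h
      simp only [List.foldl_cons]
      cases hfz : (List.range (grid.headI).toList.length).find? (fun x =>
          source == String.mk [(grid.getD z "").toList.getD x ' ']) with
      | some x => exact ihz _ (Or.inr rfl)
      | none =>
        apply ihz
        rcases h with ⟨y0, hy0, hsome⟩ | h
        · rcases List.mem_cons.mp hy0 with rfl | hy0'
          · rw [hfz] at hsome; cases hsome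
          · exact Or.inl ⟨y0, hy0', hsome⟩
        · exact Or.inr h
  obtain ⟨x, hxmem, hxeq⟩ := hx
  have := key (List.range grid.length) none
    (Or.inl ⟨y, List.mem_range.mpr hy, by rw [List.find?_isSome]; exact ⟨x, hxmem, hxeq⟩⟩)
  rw [hnone] at this
  exact absurd this (by simp)

-- ===== VERDICT (by name: the statement is the Claim_ definition above) =====
theorem is_possible_path_spec : Claim_equal_is_possible_path := by
  intro g source path _ hpre
  unfold Spec_is_possible_path is_possible_path is_possible_path_alt
  rcases hpre with ⟨-, -, hfound⟩
  cases hs : pvFindStart g.2.2 (g.2.2.headI).toList.length g.2.2.length source with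
  | none =>
    rcases hfound with hempty | hf
    · subst hempty
      simp
    · exact absurd hs (pvFindStart_found g.2.2 source hf)
  | some s =>
    simp only [hs]
    rw [pvWalk, pvBuild, List.nil_append]
    have hsh := pvShift path.toList s (0, 0)
    simp only [add_zero] at hsh
    rw [hsh, List.all_map]
    rfl
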